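-- pv_equiv track=rewrite | github.com/AuroxaTech/HAES-HVAC | src/vapi/tools/base.py | detect_profanity_abuse
-- ===== SOURCE A (Python) =====
-- def detect_profanity_abuse(
--
--     conversation_context: str | None = None,
--     user_text: str | None = None,
-- ) -> bool:
--     """
--     Detect if user is using profanity or abusive language.
--
--     Returns:
--         True if profanity/abuse detected, False otherwise
--     """
--     if not conversation_context and not user_text:
--         return False
--
--     text = (conversation_context or "") + " " + (user_text or "")
--     text_lower = text.lower()
--
--     # Common profanity/abuse indicators (basic list - can be enhanced)
--     profanity_indicators = [
--         # Profanity (common words)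
--         "fuck", "shit", "damn", "hell", "asshole", "bastard", "bitch",
--         # Abusive language
--         "you're stupid", "you're dumb", "idiot", "moron", "stupid system",
--         "this is bullshit", "this sucks", "terrible service",
--         # Threatening language
--         "i'll sue", "i'll report you", "i'll complain", "lawyer",
--         # Aggressive language
--         "i'm furious", "i'm extremely angry", "worst service ever",
--     ]
--
--     for indicator in profanity_indicators:
--         if indicator in text_lower:
--             return True
--
--     return False
-- ===== SOURCE B (Python) =====
-- _PROFANITY_INDICATORS = [
--     # Profanity (common words)
--     "fuck", "shit", "damn", "hell", "asshole", "bastard", "bitch",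
--     # Abusive language
--     "you're stupid", "you're dumb", "idiot", "moron", "stupid system",
--     "this is bullshit", "this sucks", "terrible service",
--     # Threatening language
--     "i'll sue", "i'll report you", "i'll complain", "lawyer",
--     # Aggressive language
--     "i'm furious", "i'm extremely angry", "worst service ever",
-- ]
--
--
-- def detect_profanity_abuse(
--     conversation_context: str | None = None,
--     user_text: str | None = None,
-- ) -> bool:
--     # Single left-to-right pass over the text, simulating all partial matches
--     # at once (multi-pattern NFA scan), instead of one substring pass per
--     # indicator.  No early guard needed: when both inputs are falsy the text
--     # is just " ", which matches no indicator.
--     text_lower = ((conversation_context or "") + " " + (user_text or "")).lower()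
--
--     active: list[str] = []  # suffixes of indicators still to be matched
--     for ch in text_lower:
--         nxt: list[str] = []
--         for rest in active + _PROFANITY_INDICATORS:
--             if rest[0] == ch:
--                 tail = rest[1:]
--                 if not tail:
--                     return True
--                 nxt.append(tail)
--         active = nxt
--     return False
-- ===== Notes on version B (the rewrite author's own statement) =====
-- stated objective: alternative
-- what changed: Replaces the per-indicator loop of ~22 separate substring passes with one left-to-right pass over the text that simulates all partial indicator matches simultaneously (multi-pattern NFA scan), and drops the early guard since both-empty input yields the text " " which matches nothing.
import Mathlib
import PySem

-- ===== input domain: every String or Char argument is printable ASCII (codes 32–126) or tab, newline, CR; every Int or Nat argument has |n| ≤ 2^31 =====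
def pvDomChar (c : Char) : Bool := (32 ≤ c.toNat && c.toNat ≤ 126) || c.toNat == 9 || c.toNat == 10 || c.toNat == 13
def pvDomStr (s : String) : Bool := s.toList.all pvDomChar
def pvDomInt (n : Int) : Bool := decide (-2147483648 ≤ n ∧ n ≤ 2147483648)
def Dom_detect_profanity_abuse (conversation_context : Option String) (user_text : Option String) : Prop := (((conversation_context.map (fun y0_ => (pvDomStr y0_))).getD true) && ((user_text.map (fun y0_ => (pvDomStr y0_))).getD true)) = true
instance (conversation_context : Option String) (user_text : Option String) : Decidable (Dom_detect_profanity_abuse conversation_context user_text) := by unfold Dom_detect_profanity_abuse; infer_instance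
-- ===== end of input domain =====

-- B replaces A's per-indicator substring loop with one left-to-right pass over the text that
-- advances all partial indicator matches at once (multi-pattern NFA scan) and drops the early
-- guard (both-empty input gives the text " ", which matches nothing); same return value.

-- ===== PORT A =====
-- the fixed indicator list, as lists of chars
def pvIndicators : List (List Char) :=
  ["fuck", "shit", "damn", "hell", "asshole", "bastard", "bitch", "you're stupid",
   "you're dumb", "idiot", "moron", "stupid system", "this is bullshit", "this sucks",
   "terrible service", "i'll sue", "i'll report you", "i'll complain", "lawyer",
   "i'm furious", "i'm extremely angry", "worst service ever"].map String.toList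

-- 'for indicator in profanity_indicators: if indicator in text_lower: return True / return False'
def pvLoopA : List (List Char) → List Char → Bool
  | [], _ => false
  | ind :: rest, t => if PySem.Chars.isIn ind t then true else pvLoopA rest t

def detect_profanity_abuse (conversation_context : Option String) (user_text : Option String) : Bool :=
  -- 'if not conversation_context and not user_text: return False' (falsy = None or "")
  if (conversation_context.getD "" == "") && (user_text.getD "" == "") then false
  else
    -- text = (conversation_context or "") + " " + (user_text or ""); text_lower = text.lower()
    pvLoopA pvIndicators
      (PySem.Chars.lower ((conversation_context.getD "").toList ++ [' '] ++ (user_text.getD "").toList))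

-- ===== PORT B =====
-- the inner 'for rest in active + _PROFANITY_INDICATORS: …' loop of Source B:
-- none = the Python 'return True' fired; some nxt = the collected next active suffixes
def pvAdvance : List (List Char) → Char → Option (List (List Char))
  | [], _ => some []
  | r :: rs, c =>
    match r with
    | [] => pvAdvance rs c                     -- unreachable: active suffixes stay nonempty
    | x :: tail =>
      if x == c then
        if tail = [] then none                 -- 'if not tail: return True'
        else (tail :: ·) <$> pvAdvance rs c    -- 'nxt.append(tail)'
      else pvAdvance rs c

-- the outer 'for ch in text_lower: …' loop of Source B
def pvScanNFA : List (List Char) → List Char → Bool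
  | _, [] => false
  | active, c :: t =>
    match pvAdvance (active ++ pvIndicators) c with
    | none => true
    | some nxt => pvScanNFA nxt t

def detect_profanity_abuse_alt (conversation_context : Option String) (user_text : Option String) : Bool :=
  pvScanNFA []
    (PySem.Chars.lower ((conversation_context.getD "").toList ++ [' '] ++ (user_text.getD "").toList))

-- ===== PRECONDITION & SPEC =====
def Spec_detect_profanity_abuse (conversation_context : Option String) (user_text : Option String) (out : Bool) : Prop := out = detect_profanity_abuse_alt conversation_context user_text
instance (conversation_context : Option String) (user_text : Option String) (out : Bool) : Decidable (Spec_detect_profanity_abuse conversation_context user_text out) := by unfold Spec_detect_profanity_abuse; infer_instance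

-- ===== CLAIM (what is proved, stated in full; the proofs are below) =====
def Claim_equal_detect_profanity_abuse : Prop := ∀ (conversation_context : Option String) (user_text : Option String), Dom_detect_profanity_abuse conversation_context user_text → Spec_detect_profanity_abuse conversation_context user_text (detect_profanity_abuse conversation_context user_text)

-- ===== LEMMAS AND PROOFS =====

lemma pvLoopA_eq_any (inds : List (List Char)) (t : List Char) :
    pvLoopA inds t = inds.any (fun ind => PySem.Chars.isIn ind t) := by
  induction inds with
  | nil => simp [pvLoopA]
  | cons i rest ih => simp only [pvLoopA, List.any_cons, ih]; split_ifs with h <;> simp [h]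

lemma pvIsIn_cons (ind : List Char) (c : Char) (tl : List Char) :
    PySem.Chars.isIn ind (c :: tl) = (ind.isPrefixOf (c :: tl) || PySem.Chars.isIn ind tl) := by
  have h : PySem.Chars.isIn ind (c :: tl) = true ↔
      (ind.isPrefixOf (c :: tl) || PySem.Chars.isIn ind tl) = true := by
    simp [PySem.Chars.isIn_iff_infix, List.infix_cons_iff, List.isPrefixOf_iff_prefix]
  exact Bool.coe_iff_coe.mp h

-- the 'rest[0] == ch, keep rest[1:] if nonempty' step, as a filterMap function
def pvTailIf (c : Char) : List Char → Option (List Char)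
  | [] => none
  | x :: tail => if x == c && !tail.isEmpty then some tail else none

lemma pvAdvance_eq (l : List (List Char)) (c : Char) :
    pvAdvance l c =
      if l.any (· == [c]) then none else some (l.filterMap (pvTailIf c)) := by
  induction l with
  | nil => simp [pvAdvance]
  | cons r rs ih =>
    cases r with
    | nil => simpa [pvAdvance, pvTailIf] using ih
    | cons x tail =>
      simp only [pvAdvance, ih, pvTailIf, List.any_cons, List.filterMap_cons]
      by_cases hx : x = c
      · subst hx
        by_cases ht : tail = []
        · subst ht; simp
        · simp [ht]
          split_ifs <;> simp
      · simp [hx]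

lemma pvFilterMap_any_prefix (m : List (List Char)) (c : Char) (tl : List Char)
    (hm : ∀ r ∈ m, r ≠ []) (hnc : m.any (· == [c]) = false) :
    ((m.filterMap (pvTailIf c)).any (·.isPrefixOf tl)) = m.any (·.isPrefixOf (c :: tl)) := by
  induction m with
  | nil => simp
  | cons r rs ih =>
    simp only [List.any_cons, Bool.or_eq_false_iff] at hnc
    have hm' : ∀ x ∈ rs, x ≠ [] := fun x hx => hm x (List.mem_cons_of_mem _ hx)
    rw [List.filterMap_cons]
    cases r with
    | nil => exact absurd rfl (hm [] List.mem_cons_self)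
    | cons x tail =>
      by_cases hx : x = c
      · subst hx
        have htail : tail ≠ [] := by
          intro h; subst h; simp at hnc
        have hv : pvTailIf x (x :: tail) = some tail := by
          simp [pvTailIf, htail]
        rw [hv, List.any_cons, List.any_cons, ih hm' hnc.2]
        simp [List.isPrefixOf]
      · have hv : pvTailIf c (x :: tail) = none := by
          simp [pvTailIf, hx]
        rw [hv, List.any_cons, ih hm' hnc.2]
        simp [List.isPrefixOf, hx]

lemma pvAnyOr (l : List (List Char)) (p q : List Char → Bool) :
    (l.any p || l.any q) = l.any (fun x => p x || q x) := by
  induction l with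
  | nil => simp
  | cons a t ih => simp only [List.any_cons]; cases p a <;> cases q a <;> simp [← ih]

-- main invariant: the NFA scan from an active set of pending suffixes finds exactly
-- 'some pending suffix is a prefix of t, or some indicator occurs inside t'
lemma pvAnyExt (l : List (List Char)) (p q : List Char → Bool)
    (h : ∀ x ∈ l, p x = q x) : l.any p = l.any q := by
  induction l with
  | nil => rfl
  | cons a t ih =>
    simp only [List.any_cons, h a List.mem_cons_self,
      ih fun x hx => h x (List.mem_cons_of_mem _ hx)]

lemma pvTailIf_ne_nil (c : Char) (s r : List Char) (h : pvTailIf c s = some r) : r ≠ [] := by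
  intro h0
  subst h0
  cases s with
  | nil => simp [pvTailIf] at h
  | cons a b =>
    simp only [pvTailIf] at h
    split_ifs at h with hc
    have hb : b = [] := by injection h
    subst hb
    simp at hc

lemma pvIndicators_ne_nil : ∀ r ∈ pvIndicators, r ≠ [] := by decide

-- main invariant: the NFA scan from an active set of nonempty pending suffixes finds exactly
-- 'some pending suffix is a prefix of t, or some indicator occurs inside t'
lemma pvScanNFA_eq (t : List Char) : ∀ (active : List (List Char)), (∀ r ∈ active, r ≠ []) →
    pvScanNFA active t =
      (active.any (·.isPrefixOf t) || pvIndicators.any (fun ind => PySem.Chars.isIn ind t)) := by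
  induction t with
  | nil =>
    intro active hne
    have h1 : active.any (·.isPrefixOf ([] : List Char)) = false := by
      rw [List.any_eq_false]
      intro r hr
      cases r with
      | nil => exact absurd rfl (hne [] hr)
      | cons a b => simp [List.isPrefixOf]
    have h2 : pvIndicators.any (fun ind => PySem.Chars.isIn ind ([] : List Char)) = false := by
      decide
    simp [pvScanNFA, h1, h2]
  | cons c tl ih =>
    intro active hne
    simp only [pvScanNFA, pvAdvance_eq]
    by_cases hany : (active ++ pvIndicators).any (· == [c]) = true
    · -- some pending suffix or indicator is exactly [c]: both sides are true
      rw [if_pos hany]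
      obtain ⟨r, hr, hrc⟩ := List.any_eq_true.mp hany
      have hrc : r = [c] := by simpa using hrc
      subst hrc
      rcases List.mem_append.mp hr with h | h
      · have : active.any (·.isPrefixOf (c :: tl)) = true :=
          List.any_eq_true.mpr ⟨[c], h, by simp [List.isPrefixOf]⟩
        simp [this]
      · have : pvIndicators.any (fun ind => PySem.Chars.isIn ind (c :: tl)) = true := by
          refine List.any_eq_true.mpr ⟨[c], h, ?_⟩
          rw [pvIsIn_cons]
          simp [List.isPrefixOf]
        simp [this]
    · rw [if_neg hany]
      replace hany : (active ++ pvIndicators).any (· == [c]) = false :=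
        Bool.eq_false_iff.mpr hany
      rw [List.any_append, Bool.or_eq_false_iff] at hany
      show pvScanNFA ((active ++ pvIndicators).filterMap (pvTailIf c)) tl
        = ((active.any fun x => x.isPrefixOf (c :: tl))
           || pvIndicators.any fun ind => PySem.Chars.isIn ind (c :: tl))
      have hnxt : ∀ r ∈ (active ++ pvIndicators).filterMap (pvTailIf c), r ≠ [] := by
        intro r hr
        obtain ⟨s, _, hs⟩ := List.mem_filterMap.mp hr
        exact pvTailIf_ne_nil c s r hs
      rw [ih _ hnxt, List.filterMap_append, List.any_append,
          pvFilterMap_any_prefix _ _ _ hne hany.1,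
          pvFilterMap_any_prefix _ _ _ pvIndicators_ne_nil hany.2]
      have h3 : (pvIndicators.any fun ind => PySem.Chars.isIn ind (c :: tl))
          = ((pvIndicators.any fun x => x.isPrefixOf (c :: tl))
             || pvIndicators.any fun ind => PySem.Chars.isIn ind tl) := by
        rw [pvAnyOr]
        exact pvAnyExt _ _ _ fun r _ => pvIsIn_cons r c tl
      rw [h3]
      cases active.any fun x => x.isPrefixOf (c :: tl) <;>
        cases pvIndicators.any fun x => x.isPrefixOf (c :: tl) <;>
          cases pvIndicators.any fun ind => PySem.Chars.isIn ind tl <;> rfl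

-- ===== VERDICT (by name: the statement is the Claim_ definition above) =====
theorem detect_profanity_abuse_spec : Claim_equal_detect_profanity_abuse := by
  intro cc ut _
  unfold Spec_detect_profanity_abuse detect_profanity_abuse detect_profanity_abuse_alt
  split_ifs with h
  · -- both falsy: the text is exactly [' '], on which the NFA scan returns false
    obtain ⟨h1, h2⟩ := by simpa [Bool.and_eq_true] using h
    have e1 : cc.getD "" = "" := by simpa using h1
    have e2 : ut.getD "" = "" := by simpa using h2
    rw [e1, e2]
    decide
  · rw [pvLoopA_eq_any, pvScanNFA_eq _ _ (by simp)]
    simp
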